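-- pv_equiv track=rewrite | github.com/withNoclout/LeetCode-Med | quiz_bestTower.py | bestTower
-- ===== SOURCE A (Python) =====
-- def bestTower(towers, center, radius):
--     """
--     :type towers: List[List[int]]
--     :type center: List[int]
--     :type radius: int
--     :rtype: List[int]
--     """
--     # Initialize with default "not found" values
--     best_coord = [-1, -1]
--     max_quality = -1
--
--     cx, cy = center
--
--     for x, y, q in towers:
--         # Calculate Manhattan Distance
--         dist = abs(x - cx) + abs(y - cy)
--
--         # Check reachability
--         if dist <= radius:
--             # Check if this tower is better than the current best
--             # Condition 1: Higher quality
--             if q > max_quality: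
--                 max_quality = q
--                 best_coord = [x, y]
--             # Condition 2: Same quality, but lexicographically smaller coordinate
--             elif q == max_quality:
--                 # If best_coord is [-1, -1], any valid tower is better.
--                 # Otherwise, compare coordinates.
--                 if best_coord == [-1, -1] or (x < best_coord[0]) or (x == best_coord[0] and y < best_coord[1]):
--                     best_coord = [x, y]
--
--     return best_coord
-- ===== SOURCE B (Python) =====
-- def bestTower(towers, center, radius):
--     cx, cy = center
--     reachable = [t for t in towers if abs(t[0] - cx) + abs(t[1] - cy) <= radius]
--     if not reachable:
--         return [-1, -1]
--     best = min(reachable, key=lambda t: (-t[2], t[0], t[1]))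
--     return [best[0], best[1]]
-- ===== Notes on version B (the rewrite author's own statement) =====
-- stated objective: simpler
-- what changed: Replaces the online accumulator loop (quality/coordinate state pair with nested tie-break branches and a [-1,-1]/-1 sentinel) by a reachability filter followed by a single keyed min over the filtered list.
-- intended difference: On inputs where some tower is reachable but every reachable tower has quality <= -2, A returns [-1,-1] because its -1 quality sentinel makes it skip all of them, while B returns the coordinates of the best reachable tower, which is what 'find the best reachable tower' intends. — e.g. on bestTower([[0, 0, -2]], [0, 0], 0): A returns [-1, -1], B returns [0, 0]
-- outside the precondition, e.g. on bestTower([[-1, -1, 5], [0, 0, 5]], [0, 0], 5): A returns [0, 0], B returns [-1, -1]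
import Mathlib
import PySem

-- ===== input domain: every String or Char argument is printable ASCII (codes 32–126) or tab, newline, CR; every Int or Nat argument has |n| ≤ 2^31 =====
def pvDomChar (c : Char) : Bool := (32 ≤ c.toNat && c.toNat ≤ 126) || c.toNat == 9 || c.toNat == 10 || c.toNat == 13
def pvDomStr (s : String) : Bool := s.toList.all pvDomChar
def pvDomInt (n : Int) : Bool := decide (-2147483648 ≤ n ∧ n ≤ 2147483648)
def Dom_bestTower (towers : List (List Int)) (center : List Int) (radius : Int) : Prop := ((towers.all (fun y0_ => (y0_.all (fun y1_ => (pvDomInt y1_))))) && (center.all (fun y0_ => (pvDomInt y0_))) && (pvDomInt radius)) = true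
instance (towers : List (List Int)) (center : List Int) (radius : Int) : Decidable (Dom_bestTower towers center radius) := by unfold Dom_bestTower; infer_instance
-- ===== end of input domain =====

-- B replaces A's online accumulator loop (quality/coordinate state with nested tie-break branches and
-- a [-1,-1]/-1 sentinel pair) by a reachability filter followed by one keyed min over the filtered list.

-- ===== PORT A =====
-- A-side helper: the body of A's for-loop, one tower row against the running (max_quality, best_coord) state
def bestTowerStep (cx cy radius : Int) (s : Int × List Int) (row : List Int) : Int × List Int :=
  match row with
  | [x, y, q] =>
    if |x - cx| + |y - cy| ≤ radius then
      if q > s.1 then (q, [x, y])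
      else if q = s.1 then
        if s.2 = [-1, -1] ∨ x < PySem.List.pyGetD s.2 0 0 ∨ (x = PySem.List.pyGetD s.2 0 0 ∧ y < PySem.List.pyGetD s.2 1 0)
        then (s.1, [x, y]) else s
      else s
    else s
  | _ => s   -- Python raises ValueError here (row does not unpack as x, y, q); excluded by Pre_

def bestTower (towers : List (List Int)) (center : List Int) (radius : Int) : List Int :=
  match center with
  | [cx, cy] => (towers.foldl (bestTowerStep cx cy radius) (-1, [-1, -1])).2
  | _ => [-1, -1]   -- Python raises ValueError here (center does not unpack as cx, cy); excluded by Pre_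

-- ===== PORT B =====
def bestTowerReach (cx cy radius : Int) (t : List Int) : Bool :=
  |PySem.List.pyGetD t 0 0 - cx| + |PySem.List.pyGetD t 1 0 - cy| ≤ radius

def bestTowerKey (t : List Int) : Int × Int × Int :=
  (-(PySem.List.pyGetD t 2 0), PySem.List.pyGetD t 0 0, PySem.List.pyGetD t 1 0)

-- Python's lexicographic '<' on triples of ints (hand port of tuple comparison; exact on Int triples)
def bestTowerLt (a b : Int × Int × Int) : Bool :=
  a.1 < b.1 || (a.1 == b.1 && (a.2.1 < b.2.1 || (a.2.1 == b.2.1 && a.2.2 < b.2.2)))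

-- hand port of min(h :: tl, key=bestTowerKey): first minimal element — CPython's min replaces the
-- running minimum only on a strictly smaller key
def bestTowerMin (h : List Int) (tl : List (List Int)) : List Int :=
  tl.foldl (fun b t => if bestTowerLt (bestTowerKey t) (bestTowerKey b) then t else b) h

def bestTower_alt (towers : List (List Int)) (center : List Int) (radius : Int) : List Int :=
  match center with
  | [cx, cy] =>
    match towers.filter (bestTowerReach cx cy radius) with
    | [] => [-1, -1]
    | h :: tl => [PySem.List.pyGetD (bestTowerMin h tl) 0 0, PySem.List.pyGetD (bestTowerMin h tl) 1 0]
  | _ => [-1, -1]   -- Python raises ValueError here (center does not unpack as cx, cy); excluded by Pre_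

-- ===== PRECONDITION & SPEC =====
-- Pre_ excludes the inputs on which A raises (center not of length 2, or a tower row not of length 3:
-- the tuple unpackings raise ValueError), and towers lists with a reachable tower at coordinates
-- [-1, -1], where A's use of [-1, -1] as its not-found sentinel makes the returned tie-break
-- coordinate an order-dependent accident.
def Pre_bestTower (towers : List (List Int)) (center : List Int) (radius : Int) : Prop :=
  center.length = 2 ∧
  ∀ t ∈ towers, t.length = 3 ∧
    (|PySem.List.pyGetD t 0 0 - PySem.List.pyGetD center 0 0| +
       |PySem.List.pyGetD t 1 0 - PySem.List.pyGetD center 1 0| ≤ radius →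
      ¬(PySem.List.pyGetD t 0 0 = -1 ∧ PySem.List.pyGetD t 1 0 = -1))
instance (towers : List (List Int)) (center : List Int) (radius : Int) : Decidable (Pre_bestTower towers center radius) := by unfold Pre_bestTower; infer_instance

def pvWitness_bestTower : List (List Int) × List Int × Int := ([[0, 0, 3]], [0, 0], 5)

-- On inputs where some tower is reachable but every reachable tower has quality ≤ -2, A returns
-- [-1, -1] because its -1 quality sentinel makes it skip all of them, while B returns the coordinates
-- of the best reachable tower, which is what 'find the best reachable tower' intends.
def D_bestTower (towers : List (List Int)) (center : List Int) (radius : Int) : Prop :=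
  (∃ t ∈ towers,
      |PySem.List.pyGetD t 0 0 - PySem.List.pyGetD center 0 0| +
        |PySem.List.pyGetD t 1 0 - PySem.List.pyGetD center 1 0| ≤ radius) ∧
  (∀ t ∈ towers,
      |PySem.List.pyGetD t 0 0 - PySem.List.pyGetD center 0 0| +
        |PySem.List.pyGetD t 1 0 - PySem.List.pyGetD center 1 0| ≤ radius →
      PySem.List.pyGetD t 2 0 ≤ -2)
instance (towers : List (List Int)) (center : List Int) (radius : Int) : Decidable (D_bestTower towers center radius) := by unfold D_bestTower; infer_instance

def Spec_bestTower (towers : List (List Int)) (center : List Int) (radius : Int) (out : List Int) : Prop := ¬ D_bestTower towers center radius → out = bestTower_alt towers center radius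
instance (towers : List (List Int)) (center : List Int) (radius : Int) (out : List Int) : Decidable (Spec_bestTower towers center radius out) := by unfold Spec_bestTower; infer_instance

def pvDiffWitness_bestTower : List (List Int) × List Int × Int := ([[0, 0, -2]], [0, 0], 0)
def pvDiffWitnessOut_bestTower : (List Int) × (List Int) := ([-1, -1], [0, 0])

-- ===== CLAIM (what is proved, stated in full; the proofs are below) =====
def Claim_unchanged_bestTower : Prop := ∀ (towers : List (List Int)) (center : List Int) (radius : Int), Dom_bestTower towers center radius → Pre_bestTower towers center radius → Spec_bestTower towers center radius (bestTower towers center radius)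
def Claim_changed_bestTower : Prop := Dom_bestTower (pvDiffWitness_bestTower.1) (pvDiffWitness_bestTower.2.1) (pvDiffWitness_bestTower.2.2) ∧ Pre_bestTower (pvDiffWitness_bestTower.1) (pvDiffWitness_bestTower.2.1) (pvDiffWitness_bestTower.2.2) ∧ D_bestTower (pvDiffWitness_bestTower.1) (pvDiffWitness_bestTower.2.1) (pvDiffWitness_bestTower.2.2) ∧ bestTower (pvDiffWitness_bestTower.1) (pvDiffWitness_bestTower.2.1) (pvDiffWitness_bestTower.2.2) = pvDiffWitnessOut_bestTower.1 ∧ bestTower_alt (pvDiffWitness_bestTower.1) (pvDiffWitness_bestTower.2.1) (pvDiffWitness_bestTower.2.2) = pvDiffWitnessOut_bestTower.2 ∧ pvDiffWitnessOut_bestTower.1 ≠ pvDiffWitnessOut_bestTower.2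
def Claim_exact_bestTower : Prop := ∀ (towers : List (List Int)) (center : List Int) (radius : Int), Dom_bestTower towers center radius → Pre_bestTower towers center radius → D_bestTower towers center radius → bestTower towers center radius ≠ bestTower_alt towers center radius

-- ===== LEMMAS AND PROOFS =====

@[simp] lemma btGet0 (x y z : Int) : PySem.List.pyGetD [x, y, z] 0 0 = x := by
  simp [PySem.List.pyGetD, PySem.List.pyGet?, PySem.List.pyIdx?]
@[simp] lemma btGet1 (x y z : Int) : PySem.List.pyGetD [x, y, z] 1 0 = y := by
  simp [PySem.List.pyGetD, PySem.List.pyGet?, PySem.List.pyIdx?]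
@[simp] lemma btGet2 (x y z : Int) : PySem.List.pyGetD [x, y, z] 2 0 = z := by
  simp [PySem.List.pyGetD, PySem.List.pyGet?, PySem.List.pyIdx?]
@[simp] lemma btGet0' (x y : Int) : PySem.List.pyGetD [x, y] 0 0 = x := by
  simp [PySem.List.pyGetD, PySem.List.pyGet?, PySem.List.pyIdx?]
@[simp] lemma btGet1' (x y : Int) : PySem.List.pyGetD [x, y] 1 0 = y := by
  simp [PySem.List.pyGetD, PySem.List.pyGet?, PySem.List.pyIdx?]

lemma btLen3 {t : List Int} (h : t.length = 3) : ∃ a b c : Int, t = [a, b, c] := by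
  rcases t with _ | ⟨a, _ | ⟨b, _ | ⟨c, _ | ⟨d, u⟩⟩⟩⟩ <;> simp_all

lemma btLtIff (a b c p q r : Int) :
    bestTowerLt (bestTowerKey [a, b, c]) (bestTowerKey [p, q, r]) = true ↔
      (r < c ∨ (c = r ∧ (a < p ∨ (a = p ∧ b < q)))) := by
  simp only [bestTowerLt, bestTowerKey, btGet0, btGet1, btGet2, Bool.or_eq_true,
    Bool.and_eq_true, decide_eq_true_eq, beq_iff_eq]
  omega

lemma btReachIff (cx cy radius a b c : Int) :
    bestTowerReach cx cy radius [a, b, c] = true ↔ |a - cx| + |b - cy| ≤ radius := by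
  simp [bestTowerReach]

lemma btStepEval (cx cy radius a b c m : Int) (bc : List Int) :
    bestTowerStep cx cy radius (m, bc) [a, b, c] =
      if |a - cx| + |b - cy| ≤ radius then
        if c > m then (c, [a, b])
        else if c = m then
          if bc = [-1, -1] ∨ a < PySem.List.pyGetD bc 0 0 ∨ (a = PySem.List.pyGetD bc 0 0 ∧ b < PySem.List.pyGetD bc 1 0)
          then (m, [a, b]) else (m, bc)
        else (m, bc)
      else (m, bc) := rfl

-- the rows the equivalence argument walks over: reachable length-3 rows away from the sentinel coordinate
def btGood (cx cy radius : Int) (t : List Int) : Prop :=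
  ∃ a b c : Int, t = [a, b, c] ∧ |a - cx| + |b - cy| ≤ radius ∧ ¬(a = -1 ∧ b = -1)

-- invariant linking A's (max_quality, best_coord) state with B's running minimum row
def btInv1 (s : Int × List Int) (b : List Int) : Prop :=
  s = (-1, [-1, -1]) ∧ ∃ p q r : Int, b = [p, q, r] ∧ r ≤ -2
def btInv2 (s : Int × List Int) (b : List Int) : Prop :=
  ∃ p q r : Int, b = [p, q, r] ∧ s = (r, [p, q]) ∧ -1 ≤ r ∧ ¬(p = -1 ∧ q = -1)

lemma btInv2NotSentinel (b : List Int) (h : btInv2 (-1, [-1, -1]) b) : False := by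
  obtain ⟨p, q, r, _, hs, _, hpq⟩ := h
  have hsnd := congrArg Prod.snd hs
  simp only [List.cons.injEq, and_true] at hsnd
  exact hpq ⟨hsnd.1.symm, hsnd.2.symm⟩

lemma btStep (cx cy radius : Int) (t : List Int) (s : Int × List Int) (b : List Int)
    (ht : btGood cx cy radius t) (h : btInv1 s b ∨ btInv2 s b) :
    (btInv1 (bestTowerStep cx cy radius s t) (if bestTowerLt (bestTowerKey t) (bestTowerKey b) then t else b)
       ∨ btInv2 (bestTowerStep cx cy radius s t) (if bestTowerLt (bestTowerKey t) (bestTowerKey b) then t else b)) ∧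
    (btInv2 s b → btInv2 (bestTowerStep cx cy radius s t) (if bestTowerLt (bestTowerKey t) (bestTowerKey b) then t else b)) ∧
    (-1 ≤ PySem.List.pyGetD t 2 0 → btInv2 (bestTowerStep cx cy radius s t) (if bestTowerLt (bestTowerKey t) (bestTowerKey b) then t else b)) := by
  obtain ⟨a, b2, c, rfl, hreach, hcoord⟩ := ht
  rcases h with ⟨hs, p, q, r, rfl, hr⟩ | ⟨p, q, r, rfl, hs, hr, hpq⟩
  · -- btInv1: nothing selected yet, running minimum has quality ≤ -2
    subst hs
    by_cases hc : -1 ≤ c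
    · have hlt : bestTowerLt (bestTowerKey [a, b2, c]) (bestTowerKey [p, q, r]) = true := by
        rw [btLtIff]; omega
      have hstep : bestTowerStep cx cy radius (-1, [-1, -1]) [a, b2, c] = (c, [a, b2]) := by
        rw [btStepEval, if_pos hreach]
        by_cases h1 : c > -1
        · rw [if_pos h1]
        · have hc1 : c = -1 := by omega
          subst hc1
          rw [if_neg h1, if_pos rfl, if_pos (Or.inl rfl)]
      have h2 : btInv2 (bestTowerStep cx cy radius (-1, [-1, -1]) [a, b2, c])
          (if bestTowerLt (bestTowerKey [a, b2, c]) (bestTowerKey [p, q, r]) then [a, b2, c] else [p, q, r]) := by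
        rw [hstep, if_pos hlt]
        exact ⟨a, b2, c, rfl, rfl, hc, hcoord⟩
      exact ⟨Or.inr h2, fun hx => absurd hx (fun hx => btInv2NotSentinel _ hx), fun _ => h2⟩
    · have hstep : bestTowerStep cx cy radius (-1, [-1, -1]) [a, b2, c] = (-1, [-1, -1]) := by
        rw [btStepEval, if_pos hreach, if_neg (by omega : ¬ c > -1), if_neg (by omega : ¬ c = -1)]
      refine ⟨Or.inl ⟨hstep, ?_⟩,
              fun hx => absurd hx (fun hx => btInv2NotSentinel _ hx),
              fun hx => absurd hx (by simp only [btGet2]; omega)⟩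
      by_cases hlt : bestTowerLt (bestTowerKey [a, b2, c]) (bestTowerKey [p, q, r]) = true
      · rw [if_pos hlt]; exact ⟨a, b2, c, rfl, by omega⟩
      · rw [if_neg hlt]; exact ⟨p, q, r, rfl, hr⟩
  · -- btInv2: a best reachable row is selected on both sides
    subst hs
    rcases lt_trichotomy r c with hcr | hcr | hcr
    · -- strictly better quality: both replace
      have hlt : bestTowerLt (bestTowerKey [a, b2, c]) (bestTowerKey [p, q, r]) = true := by
        rw [btLtIff]; omega
      have hstep : bestTowerStep cx cy radius (r, [p, q]) [a, b2, c] = (c, [a, b2]) := by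
        rw [btStepEval, if_pos hreach, if_pos (by omega : c > r)]
      have h2 : btInv2 (bestTowerStep cx cy radius (r, [p, q]) [a, b2, c])
          (if bestTowerLt (bestTowerKey [a, b2, c]) (bestTowerKey [p, q, r]) then [a, b2, c] else [p, q, r]) := by
        rw [hstep, if_pos hlt]
        exact ⟨a, b2, c, rfl, rfl, by omega, hcoord⟩
      exact ⟨Or.inr h2, fun _ => h2, fun _ => h2⟩
    · -- equal quality: both replace exactly on a lexicographically smaller coordinate
      by_cases hco : a < p ∨ (a = p ∧ b2 < q)
      · have hlt : bestTowerLt (bestTowerKey [a, b2, c]) (bestTowerKey [p, q, r]) = true := by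
          rw [btLtIff]; exact Or.inr ⟨hcr.symm, hco⟩
        have hstep : bestTowerStep cx cy radius (r, [p, q]) [a, b2, c] = (r, [a, b2]) := by
          rw [btStepEval, if_pos hreach, if_neg (by omega : ¬ c > r), if_pos (by omega : c = r),
            if_pos (by simp only [btGet0', btGet1']; tauto)]
        have h2 : btInv2 (bestTowerStep cx cy radius (r, [p, q]) [a, b2, c])
            (if bestTowerLt (bestTowerKey [a, b2, c]) (bestTowerKey [p, q, r]) then [a, b2, c] else [p, q, r]) := by
          rw [hstep, if_pos hlt]
          exact ⟨a, b2, c, rfl, by rw [hcr], by omega, hcoord⟩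
        exact ⟨Or.inr h2, fun _ => h2, fun _ => h2⟩
      · have hlt : ¬ bestTowerLt (bestTowerKey [a, b2, c]) (bestTowerKey [p, q, r]) = true := by
          rw [btLtIff]; omega
        have hpq' : ([p, q] : List Int) ≠ [-1, -1] := by
          intro hx
          simp only [List.cons.injEq, and_true] at hx
          exact hpq ⟨hx.1, hx.2⟩
        have hstep : bestTowerStep cx cy radius (r, [p, q]) [a, b2, c] = (r, [p, q]) := by
          rw [btStepEval, if_pos hreach, if_neg (by omega : ¬ c > r), if_pos (by omega : c = r),
            if_neg ?hcond]
          case hcond =>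
            simp only [btGet0', btGet1']
            rintro (hx | hx | ⟨hx1, hx2⟩)
            · exact hpq' hx
            · exact hco (Or.inl hx)
            · exact hco (Or.inr ⟨hx1, hx2⟩)
        have h2 : btInv2 (bestTowerStep cx cy radius (r, [p, q]) [a, b2, c])
            (if bestTowerLt (bestTowerKey [a, b2, c]) (bestTowerKey [p, q, r]) then [a, b2, c] else [p, q, r]) := by
          rw [hstep, if_neg hlt]
          exact ⟨p, q, r, rfl, rfl, hr, hpq⟩
        exact ⟨Or.inr h2, fun _ => h2, fun _ => h2⟩
    · -- strictly worse quality: both keep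
      have hlt : ¬ bestTowerLt (bestTowerKey [a, b2, c]) (bestTowerKey [p, q, r]) = true := by
        rw [btLtIff]; omega
      have hstep : bestTowerStep cx cy radius (r, [p, q]) [a, b2, c] = (r, [p, q]) := by
        rw [btStepEval, if_pos hreach, if_neg (by omega : ¬ c > r), if_neg (by omega : ¬ c = r)]
      have h2 : btInv2 (bestTowerStep cx cy radius (r, [p, q]) [a, b2, c])
          (if bestTowerLt (bestTowerKey [a, b2, c]) (bestTowerKey [p, q, r]) then [a, b2, c] else [p, q, r]) := by
        rw [hstep, if_neg hlt]
        exact ⟨p, q, r, rfl, rfl, hr, hpq⟩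
      exact ⟨Or.inr h2, fun _ => h2, fun _ => h2⟩

lemma btInit (cx cy radius : Int) (t : List Int) (ht : btGood cx cy radius t) :
    (btInv1 (bestTowerStep cx cy radius (-1, [-1, -1]) t) t
       ∨ btInv2 (bestTowerStep cx cy radius (-1, [-1, -1]) t) t) ∧
    (-1 ≤ PySem.List.pyGetD t 2 0 → btInv2 (bestTowerStep cx cy radius (-1, [-1, -1]) t) t) := by
  obtain ⟨a, b2, c, rfl, hreach, hcoord⟩ := ht
  by_cases hc : -1 ≤ c
  · have hstep : bestTowerStep cx cy radius (-1, [-1, -1]) [a, b2, c] = (c, [a, b2]) := by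
      rw [btStepEval, if_pos hreach]
      by_cases h1 : c > -1
      · rw [if_pos h1]
      · have hc1 : c = -1 := by omega
        subst hc1
        rw [if_neg h1, if_pos rfl, if_pos (Or.inl rfl)]
    rw [hstep]
    exact ⟨Or.inr ⟨a, b2, c, rfl, rfl, hc, hcoord⟩, fun _ => ⟨a, b2, c, rfl, rfl, hc, hcoord⟩⟩
  · have hstep : bestTowerStep cx cy radius (-1, [-1, -1]) [a, b2, c] = (-1, [-1, -1]) := by
      rw [btStepEval, if_pos hreach, if_neg (by omega : ¬ c > -1), if_neg (by omega : ¬ c = -1)]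
    rw [hstep]
    exact ⟨Or.inl ⟨rfl, a, b2, c, rfl, by omega⟩,
           fun h2 => absurd h2 (by simp only [btGet2]; omega)⟩

lemma btFold (cx cy radius : Int) (ts : List (List Int)) :
    ∀ (s : Int × List Int) (b : List Int),
      (∀ t ∈ ts, btGood cx cy radius t) →
      (btInv1 s b ∨ btInv2 s b) →
      (btInv1 (ts.foldl (bestTowerStep cx cy radius) s) (bestTowerMin b ts)
         ∨ btInv2 (ts.foldl (bestTowerStep cx cy radius) s) (bestTowerMin b ts)) ∧
      ((btInv2 s b ∨ ∃ t ∈ ts, -1 ≤ PySem.List.pyGetD t 2 0) →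
        btInv2 (ts.foldl (bestTowerStep cx cy radius) s) (bestTowerMin b ts)) := by
  induction ts with
  | nil =>
    intro s b _ h
    refine ⟨h, fun h2 => ?_⟩
    rcases h2 with h2 | ⟨t, ht, _⟩
    · exact h2
    · simp at ht
  | cons t ts ih =>
    intro s b hg h
    have hgt : btGood cx cy radius t := hg t (List.mem_cons_self ..)
    have hgts : ∀ t' ∈ ts, btGood cx cy radius t' := fun t' ht' => hg t' (List.mem_cons_of_mem _ ht')
    have hstep := btStep cx cy radius t s b hgt h
    have hmin : bestTowerMin b (t :: ts) =
        bestTowerMin (if bestTowerLt (bestTowerKey t) (bestTowerKey b) then t else b) ts := rfl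
    have IH := ih (bestTowerStep cx cy radius s t)
      (if bestTowerLt (bestTowerKey t) (bestTowerKey b) then t else b) hgts hstep.1
    rw [List.foldl_cons, hmin]
    refine ⟨IH.1, fun h2 => IH.2 ?_⟩
    rcases h2 with h2 | ⟨t', ht', hq⟩
    · exact Or.inl (hstep.2.1 h2)
    · rcases List.mem_cons.mp ht' with rfl | ht''
      · exact Or.inl (hstep.2.2 hq)
      · exact Or.inr ⟨t', ht'', hq⟩

lemma btFoldFilter (cx cy radius : Int) (ts : List (List Int)) :
    ∀ s : Int × List Int, (∀ t ∈ ts, t.length = 3) →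
      ts.foldl (bestTowerStep cx cy radius) s
        = (ts.filter (bestTowerReach cx cy radius)).foldl (bestTowerStep cx cy radius) s := by
  induction ts with
  | nil => intro s _; rfl
  | cons t ts ih =>
    intro s hlen
    obtain ⟨a, b, c, rfl⟩ := btLen3 (hlen t (List.mem_cons_self ..))
    have htl : ∀ t' ∈ ts, t'.length = 3 := fun t' ht' => hlen t' (List.mem_cons_of_mem _ ht')
    by_cases hr : bestTowerReach cx cy radius [a, b, c] = true
    · rw [List.filter_cons_of_pos hr, List.foldl_cons, List.foldl_cons]
      exact ih _ htl
    · have hnr : ¬ |a - cx| + |b - cy| ≤ radius := fun hx => hr ((btReachIff cx cy radius a b c).mpr hx)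
      obtain ⟨m, bc⟩ := s
      have hstep : bestTowerStep cx cy radius (m, bc) [a, b, c] = (m, bc) := by
        rw [btStepEval, if_neg hnr]
      rw [List.filter_cons_of_neg (by simpa using hr), List.foldl_cons, hstep]
      exact ih _ htl

lemma btFoldLow (cx cy radius : Int) (ts : List (List Int)) :
    (∀ t ∈ ts, t.length = 3 ∧
        (|PySem.List.pyGetD t 0 0 - cx| + |PySem.List.pyGetD t 1 0 - cy| ≤ radius →
          PySem.List.pyGetD t 2 0 ≤ -2)) →
    ts.foldl (bestTowerStep cx cy radius) (-1, [-1, -1]) = (-1, [-1, -1]) := by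
  induction ts with
  | nil => intro _; rfl
  | cons t ts ih =>
    intro h
    obtain ⟨a, b, c, rfl⟩ := btLen3 (h t (List.mem_cons_self ..)).1
    have hq := (h _ (List.mem_cons_self ..)).2
    simp only [btGet0, btGet1, btGet2] at hq
    have hstep : bestTowerStep cx cy radius (-1, [-1, -1]) [a, b, c] = (-1, [-1, -1]) := by
      by_cases hr : |a - cx| + |b - cy| ≤ radius
      · rw [btStepEval, if_pos hr, if_neg (by have := hq hr; omega : ¬ c > -1),
          if_neg (by have := hq hr; omega : ¬ c = -1)]
      · rw [btStepEval, if_neg hr]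
    rw [List.foldl_cons, hstep]
    exact ih (fun t' ht' => h t' (List.mem_cons_of_mem _ ht'))

lemma btMinMem (ts : List (List Int)) : ∀ b : List Int, bestTowerMin b ts = b ∨ bestTowerMin b ts ∈ ts := by
  induction ts with
  | nil => intro b; exact Or.inl rfl
  | cons t ts ih =>
    intro b
    have hmin : bestTowerMin b (t :: ts) =
        bestTowerMin (if bestTowerLt (bestTowerKey t) (bestTowerKey b) then t else b) ts := rfl
    rw [hmin]
    rcases ih (if bestTowerLt (bestTowerKey t) (bestTowerKey b) then t else b) with h | h
    · rw [h]
      by_cases hlt : bestTowerLt (bestTowerKey t) (bestTowerKey b) = true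
      · exact Or.inr (by simp [hlt])
      · simp [hlt]
    · exact Or.inr (List.mem_cons_of_mem _ h)

-- ===== VERDICT (by name: the statement is the Claim_ definition above) =====
theorem bestTower_spec : Claim_unchanged_bestTower := by
  unfold Claim_unchanged_bestTower
  intro towers center radius _ hPre
  intro hnD
  obtain ⟨hclen, hrows⟩ := hPre
  rcases center with _ | ⟨cx, _ | ⟨cy, _ | ⟨z, rest⟩⟩⟩ <;> simp at hclen
  have hlen : ∀ t ∈ towers, t.length = 3 := fun t ht => (hrows t ht).1
  simp only [bestTower, bestTower_alt]
  rcases hR : towers.filter (bestTowerReach cx cy radius) with _ | ⟨h, tl⟩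
  · rw [btFoldFilter cx cy radius towers _ hlen, hR]
    rfl
  · -- every filtered row is good
    have hmemR : ∀ t ∈ towers.filter (bestTowerReach cx cy radius), btGood cx cy radius t := by
      intro t ht
      have ht' := List.mem_filter.mp ht
      obtain ⟨a, b, c, rfl⟩ := btLen3 (hlen t ht'.1)
      have hreach : |a - cx| + |b - cy| ≤ radius := (btReachIff cx cy radius a b c).mp ht'.2
      have hco := (hrows _ ht'.1).2
      simp only [btGet0, btGet1, btGet0', btGet1'] at hco
      exact ⟨a, b, c, rfl, hreach, hco hreach⟩
    have hhR : h ∈ towers.filter (bestTowerReach cx cy radius) := by rw [hR]; exact List.mem_cons_self ..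
    have htlR : ∀ t ∈ tl, t ∈ towers.filter (bestTowerReach cx cy radius) := by
      intro t ht; rw [hR]; exact List.mem_cons_of_mem _ ht
    -- ¬D_ plus a reachable row gives a reachable row of quality ≥ -1
    have hEx : ∃ t ∈ towers.filter (bestTowerReach cx cy radius), -1 ≤ PySem.List.pyGetD t 2 0 := by
      by_contra hno
      simp only [not_exists, not_and, not_le] at hno
      apply hnD
      constructor
      · have hh := List.mem_filter.mp hhR
        obtain ⟨a, b, c, rfl⟩ := btLen3 (hlen h hh.1)
        exact ⟨[a, b, c], hh.1, by simpa using (btReachIff cx cy radius a b c).mp hh.2⟩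
      · intro t ht hreach
        obtain ⟨a, b, c, rfl⟩ := btLen3 (hlen t ht)
        simp only [btGet0, btGet1, btGet0', btGet1', btGet2] at hreach ⊢
        have hmem : [a, b, c] ∈ towers.filter (bestTowerReach cx cy radius) :=
          List.mem_filter.mpr ⟨ht, (btReachIff cx cy radius a b c).mpr hreach⟩
        have hq := hno _ hmem
        simp only [btGet2] at hq
        omega
    have hgood_h : btGood cx cy radius h := hmemR h hhR
    have hinit := btInit cx cy radius h hgood_h
    have hfold := btFold cx cy radius tl (bestTowerStep cx cy radius (-1, [-1, -1]) h) h
      (fun t ht => hmemR t (htlR t ht)) hinit.1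
    have hInv2 : btInv2 (tl.foldl (bestTowerStep cx cy radius) (bestTowerStep cx cy radius (-1, [-1, -1]) h))
        (bestTowerMin h tl) := by
      apply hfold.2
      obtain ⟨t0, ht0, hq0⟩ := hEx
      rw [hR] at ht0
      rcases List.mem_cons.mp ht0 with rfl | ht0'
      · exact Or.inl (hinit.2 hq0)
      · exact Or.inr ⟨t0, ht0', hq0⟩
    obtain ⟨p, q, r, hbest, hstate, _, _⟩ := hInv2
    rw [btFoldFilter cx cy radius towers _ hlen, hR, List.foldl_cons, hstate]
    show ([p, q] : List Int)
      = [PySem.List.pyGetD (bestTowerMin h tl) 0 0, PySem.List.pyGetD (bestTowerMin h tl) 1 0]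
    rw [hbest, btGet0, btGet1]

theorem bestTower_changed : Claim_changed_bestTower := by
  unfold Claim_changed_bestTower; decide

theorem bestTower_tight : Claim_exact_bestTower := by
  unfold Claim_exact_bestTower
  intro towers center radius _ hPre hD
  obtain ⟨hclen, hrows⟩ := hPre
  rcases center with _ | ⟨cx, _ | ⟨cy, _ | ⟨z, rest⟩⟩⟩ <;> simp at hclen
  obtain ⟨⟨t0, ht0, hreach0⟩, hall⟩ := hD
  have hlen : ∀ t ∈ towers, t.length = 3 := fun t ht => (hrows t ht).1
  simp only [bestTower, bestTower_alt]
  -- A returns the sentinel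
  have hA : towers.foldl (bestTowerStep cx cy radius) (-1, [-1, -1]) = (-1, [-1, -1]) := by
    apply btFoldLow
    intro t ht
    refine ⟨hlen t ht, fun hr => ?_⟩
    have hq := hall t ht
    simp only [btGet0', btGet1'] at hq
    exact hq hr
  -- B returns a reachable tower, whose coordinates are not the sentinel
  have ht0R : t0 ∈ towers.filter (bestTowerReach cx cy radius) := by
    obtain ⟨a, b, c, rfl⟩ := btLen3 (hlen t0 ht0)
    simp only [btGet0, btGet1, btGet0', btGet1'] at hreach0
    exact List.mem_filter.mpr ⟨ht0, (btReachIff cx cy radius a b c).mpr hreach0⟩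
  rcases hR : towers.filter (bestTowerReach cx cy radius) with _ | ⟨h, tl⟩
  · rw [hR] at ht0R; simp at ht0R
  · have hbestR : bestTowerMin h tl ∈ towers.filter (bestTowerReach cx cy radius) := by
      rcases btMinMem tl h with hb | hb
      · rw [hR, hb]; exact List.mem_cons_self ..
      · rw [hR]; exact List.mem_cons_of_mem _ hb
    have hb' := List.mem_filter.mp hbestR
    obtain ⟨a, b, c, hbc⟩ := btLen3 (hlen _ hb'.1)
    have hreach : |a - cx| + |b - cy| ≤ radius := by
      rw [hbc] at hb'; exact (btReachIff cx cy radius a b c).mp hb'.2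
    have hco := (hrows _ hb'.1).2
    rw [hbc] at hco
    simp only [btGet0, btGet1, btGet0', btGet1'] at hco
    have hco' := hco hreach
    rw [hA]
    show ([-1, -1] : List Int)
      ≠ [PySem.List.pyGetD (bestTowerMin h tl) 0 0, PySem.List.pyGetD (bestTowerMin h tl) 1 0]
    rw [hbc, btGet0, btGet1]
    intro hcontr
    simp only [List.cons.injEq, and_true] at hcontr
    exact hco' ⟨hcontr.1.symm, hcontr.2.symm⟩
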